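-- pv_equiv track=rewrite | github.com/jgwinnup/how2view | utils/compute_alignments.py | all_alignments
-- ===== SOURCE A (Python) =====
-- from collections import deque
--
-- def all_alignments(x, y):
--     """Return an iterable of all alignments of two
--     sequences.
--
--     x, y -- Sequences.
--     """
--
--     def F(x, y):
--         """A helper function that recursively builds the
--         alignments.
--
--         x, y -- Sequence indices for the original x and y.
--         """
--         if len(x) == 0 and len(y) == 0:
--             yield deque()
--
--         scenarios = []
--         if len(x) > 0 and len(y) > 0:
--             scenarios.append((x[0], x[1:], y[0], y[1:]))
--         if len(x) > 0:
--             scenarios.append((x[0], x[1:], None, y))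
--         if len(y) > 0:
--             scenarios.append((None, x, y[0], y[1:]))
--
--         # NOTE: "xh" and "xt" stand for "x-head" and "x-tail",
--         # with "head" being the front of the sequence, and
--         # "tail" being the rest of the sequence. Similarly for
--         # "yh" and "yt".
--         for xh, xt, yh, yt in scenarios:
--             for alignment in F(xt, yt):
--                 alignment.appendleft((xh, yh))
--                 yield alignment
--
--     alignments = F(range(len(x)), range(len(y)))
--     return map(list, alignments)
-- ===== SOURCE B (Python) =====
-- def all_alignments(x, y):
--     """Return all alignments of two sequences as lists of index pairs,
--     via an iterative forward backtracker with a shared accumulator."""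
--     n, m = len(x), len(y)
--     out = []
--     acc = []
--     def go(i, j):
--         if i == n and j == m:
--             out.append(list(acc))
--             return
--         if i < n and j < m:
--             acc.append((i, j))
--             go(i + 1, j + 1)
--             acc.pop()
--         if i < n:
--             acc.append((i, None))
--             go(i + 1, j)
--             acc.pop()
--         if j < m:
--             acc.append((None, j))
--             go(i, j + 1)
--             acc.pop()
--     go(0, 0)
--     return out
-- ===== Notes on version B (the rewrite author's own statement) =====
-- stated objective: alternative
-- what changed: Replaced A's generator recursion on sequence suffixes that prepends pairs to each yielded deque on return with an iterative forward backtracker over index positions (i,j) sharing one accumulator list that is appended/popped, emitting a copy at each completed alignment.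
import Mathlib
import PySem

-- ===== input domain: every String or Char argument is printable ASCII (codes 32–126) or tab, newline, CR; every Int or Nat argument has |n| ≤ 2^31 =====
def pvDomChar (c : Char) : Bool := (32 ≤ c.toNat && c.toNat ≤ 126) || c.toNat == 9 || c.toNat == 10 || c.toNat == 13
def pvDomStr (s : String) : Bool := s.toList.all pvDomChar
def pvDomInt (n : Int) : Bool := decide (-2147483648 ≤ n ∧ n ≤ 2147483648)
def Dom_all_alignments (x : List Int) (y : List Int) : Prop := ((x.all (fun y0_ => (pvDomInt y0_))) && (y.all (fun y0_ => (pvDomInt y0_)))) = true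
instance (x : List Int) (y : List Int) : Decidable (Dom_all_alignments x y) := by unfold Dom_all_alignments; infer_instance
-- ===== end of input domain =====

-- B restructures A's generator recursion (suffixes + prepend-on-return) into a forward
-- accumulator-passing backtracker over index positions; same output, same cost ("alternative").

-- ===== PORT A =====
-- A's helper F: recursion on the two (index-)sequences; base case yields the empty
-- alignment, then the three scenarios in A's order (match, x-gap, y-gap), each prepending
-- the head pair to every alignment of the tails.
def pvF (x y : List Int) : List (List (Option Int × Option Int)) :=
  (if x = [] ∧ y = [] then [[]] else []) ++
  (match x, y with
   | xh :: xt, yh :: yt =>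
       (pvF xt yt).map (fun a => (some xh, some yh) :: a) ++
       (pvF xt (yh :: yt)).map (fun a => (some xh, none) :: a) ++
       (pvF (xh :: xt) yt).map (fun a => ((none : Option Int), some yh) :: a)
   | xh :: xt, [] => (pvF xt []).map (fun a => (some xh, (none : Option Int)) :: a)
   | [], yh :: yt => (pvF [] yt).map (fun a => ((none : Option Int), some yh) :: a)
   | [], [] => [])
termination_by x.length + y.length
decreasing_by all_goals simp_all <;> omega

-- A calls F on range(len(x)), range(len(y)) and maps list over the yielded deques.
def all_alignments (x : List Int) (y : List Int) : List (List (Option Int × Option Int)) :=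
  pvF ((List.range x.length).map Int.ofNat) ((List.range y.length).map Int.ofNat)

-- ===== PORT B =====
-- B's go: forward over positions i,j with the accumulated partial alignment acc;
-- at (n,m) emit a copy of acc, else try match, x-gap, y-gap in that order.
def pvGo (n m i j : Int) (acc : List (Option Int × Option Int)) :
    List (List (Option Int × Option Int)) :=
  if _h0 : i = n ∧ j = m then [acc]
  else
    (if _h1 : i < n ∧ j < m then pvGo n m (i + 1) (j + 1) (acc ++ [(some i, some j)]) else []) ++
    (if _h2 : i < n then pvGo n m (i + 1) j (acc ++ [(some i, none)]) else []) ++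
    (if _h3 : j < m then pvGo n m i (j + 1) (acc ++ [(none, some j)]) else [])
termination_by (n - i).toNat + (m - j).toNat
decreasing_by all_goals omega

def all_alignments_alt (x : List Int) (y : List Int) : List (List (Option Int × Option Int)) :=
  pvGo x.length y.length 0 0 []

-- ===== PRECONDITION & SPEC =====
def Spec_all_alignments (x : List Int) (y : List Int) (out : List (List (Option Int × Option Int))) : Prop := out = all_alignments_alt x y
instance (x : List Int) (y : List Int) (out : List (List (Option Int × Option Int))) : Decidable (Spec_all_alignments x y out) := by unfold Spec_all_alignments; infer_instance

-- ===== CLAIM (what is proved, stated in full; the proofs are below) =====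
def Claim_equal_all_alignments : Prop := ∀ (x : List Int) (y : List Int), Dom_all_alignments x y → Spec_all_alignments x y (all_alignments x y)

-- ===== LEMMAS AND PROOFS =====

-- the list of indices i, i+1, …, i+a-1 (what A's range-suffixes look like)
def pvIdx (i : Int) : Nat → List Int
  | 0 => []
  | a + 1 => i :: pvIdx (i + 1) a

theorem pvIdx_snoc (a : Nat) : ∀ i : Int, pvIdx i (a + 1) = pvIdx i a ++ [i + (a : Int)] := by
  induction a with
  | zero => intro i; simp [pvIdx]
  | succ a ih =>
    intro i
    show i :: pvIdx (i + 1) (a + 1) = (i :: pvIdx (i + 1) a) ++ [i + ((a : Int) + 1)]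
    rw [ih (i + 1)]
    simp only [List.cons_append]
    congr 3
    ring

theorem pvIdx_zero (a : Nat) : pvIdx 0 a = (List.range a).map Int.ofNat := by
  induction a with
  | zero => simp [pvIdx]
  | succ a ih =>
    rw [pvIdx_snoc, ih, List.range_succ, List.map_append]
    simp [Int.ofNat_eq_natCast]

theorem pvGo_eq (k : Nat) : ∀ (a b : Nat), a + b = k → ∀ (n m i j : Int)
    (acc : List (Option Int × Option Int)), n = i + a → m = j + b →
    pvGo n m i j acc = (pvF (pvIdx i a) (pvIdx j b)).map (fun t => acc ++ t) := by
  induction k using Nat.strong_induction_on with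
  | _ k ih =>
    intro a b hk n m i j acc hn hm
    rw [pvGo]
    match a, b with
    | 0, 0 =>
      have h0 : i = n ∧ j = m := by constructor <;> omega
      rw [dif_pos h0]
      simp [pvIdx, pvF]
    | 0, b + 1 =>
      have h1 : ¬ (i = n ∧ j = m) := by push_cast at hm; omega
      have h2 : ¬ (i < n ∧ j < m) := by omega
      have h3 : ¬ i < n := by omega
      have h4 : j < m := by push_cast at hm; omega
      rw [dif_neg h1, dif_neg h2, dif_neg h3, dif_pos h4]
      have e3 := ih (0 + b) (by omega) 0 b rfl n m i (j + 1)
        (acc ++ [(none, some j)]) hn (by push_cast at hm ⊢; omega)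
      rw [e3]
      simp [pvIdx, pvF, List.map_map, Function.comp_def]
    | a + 1, 0 =>
      have h1 : ¬ (i = n ∧ j = m) := by push_cast at hn; omega
      have h2 : ¬ (i < n ∧ j < m) := by omega
      have h3 : i < n := by push_cast at hn; omega
      have h4 : ¬ j < m := by omega
      rw [dif_neg h1, dif_neg h2, dif_pos h3, dif_neg h4]
      have e2 := ih (a + 0) (by omega) a 0 rfl n m (i + 1) j
        (acc ++ [(some i, none)]) (by push_cast at hn ⊢; omega) hm
      rw [e2]
      simp [pvIdx, pvF, List.map_map, Function.comp_def]
    | a + 1, b + 1 =>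
      have h1 : ¬ (i = n ∧ j = m) := by push_cast at hn; omega
      have h2 : i < n ∧ j < m := by push_cast at hn hm; omega
      rw [dif_neg h1, dif_pos h2, dif_pos h2.1, dif_pos h2.2]
      have e1 := ih (a + b) (by omega) a b rfl n m (i + 1) (j + 1)
        (acc ++ [(some i, some j)]) (by push_cast at hn ⊢; omega) (by push_cast at hm ⊢; omega)
      have e2 := ih (a + (b + 1)) (by omega) a (b + 1) rfl n m (i + 1) j
        (acc ++ [(some i, none)]) (by push_cast at hn ⊢; omega) hm
      have e3 := ih ((a + 1) + b) (by omega) (a + 1) b rfl n m i (j + 1)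
        (acc ++ [(none, some j)]) hn (by push_cast at hm ⊢; omega)
      rw [e1, e2, e3]
      simp [pvIdx, pvF, List.map_map, Function.comp_def]

-- ===== VERDICT (by name: the statement is the Claim_ definition above) =====
theorem all_alignments_spec : Claim_equal_all_alignments := by
  intro x y _
  unfold Spec_all_alignments all_alignments all_alignments_alt
  rw [pvGo_eq (x.length + y.length) x.length y.length rfl _ _ 0 0 []
    (by omega) (by omega), pvIdx_zero, pvIdx_zero]
  simp
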